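-- pv_equiv track=rewrite | github.com/s-fraresso/Project_Euler | src/1-99/0098.py | reduced_counter
-- ===== SOURCE A (Python) =====
-- def reduced_counter(counter):
--     rcount = [0]*26
--     i = 0
--     for n in counter:
--         if n == 0:
--             continue
--         j = i
--         while j > 0 and rcount[j - 1] < n:
--             rcount[j], rcount[j - 1] = rcount[j -1], rcount[j]
--             j -= 1
--         rcount[j] = n
--         i += 1
--     return rcount
-- ===== SOURCE B (Python) =====
-- def reduced_counter(counter):
--     vals = sorted((n for n in counter if n != 0), reverse=True)
--     return vals + [0] * (26 - len(vals))
-- ===== Notes on version B (the rewrite author's own statement) =====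
-- stated objective: simpler
-- what changed: Replaces A's in-place descending insertion sort into a fixed 26-slot array (with manual swap loop and insert index) by a single library sort of the nonzero values in reverse order plus zero-padding to length 26.
import Mathlib
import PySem

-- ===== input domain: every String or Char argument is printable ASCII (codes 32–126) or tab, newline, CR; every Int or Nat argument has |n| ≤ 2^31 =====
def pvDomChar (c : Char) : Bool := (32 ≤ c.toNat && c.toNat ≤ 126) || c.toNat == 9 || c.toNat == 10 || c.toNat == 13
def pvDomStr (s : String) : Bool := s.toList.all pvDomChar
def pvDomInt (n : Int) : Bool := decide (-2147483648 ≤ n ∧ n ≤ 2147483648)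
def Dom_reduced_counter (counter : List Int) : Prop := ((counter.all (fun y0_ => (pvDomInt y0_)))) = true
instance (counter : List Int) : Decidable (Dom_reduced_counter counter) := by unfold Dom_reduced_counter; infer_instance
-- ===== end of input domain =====

-- B replaces A's manual descending insertion sort into a fixed 26-slot array by one
-- library sort (reverse) of the nonzero values plus zero-padding to length 26 (simpler).

-- ===== PORT A =====
-- A's inner while loop: j counts down, swapping rcount[j] and rcount[j-1] while
-- rcount[j-1] < n, then writes rcount[j] = n.  (Out-of-range writes only occur on
-- inputs excluded by Pre_; List.set is then a no-op, faithful inside Pre_.)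
def aInsert (rcount : List Int) (n : Int) : Nat → List Int
  | 0 => rcount.set 0 n
  | j+1 =>
    let a := rcount.getD j 0
    let b := rcount.getD (j+1) 0
    if a < n then aInsert ((rcount.set (j+1) a).set j b) n j
    else rcount.set (j+1) n

def reduced_counter (counter : List Int) : List Int :=
  (counter.foldl
    (fun (st : List Int × Nat) n =>
      if n = 0 then st
      else (aInsert st.1 n st.2, st.2 + 1))
    (List.replicate 26 0, 0)).1

-- ===== PORT B =====
def reduced_counter_alt (counter : List Int) : List Int :=
  let vals := counter.filter (fun n => n ≠ 0)
  let s := PySem.List.sorted vals (fun x => x) true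
  s ++ List.replicate (26 - s.length) 0

-- ===== PRECONDITION & SPEC =====
-- Pre_ excludes exactly the inputs with more than 26 nonzero entries, on which A
-- raises IndexError writing past the fixed 26-slot array.
def Pre_reduced_counter (counter : List Int) : Prop :=
  (counter.filter (fun n => n ≠ 0)).length ≤ 26
instance (counter : List Int) : Decidable (Pre_reduced_counter counter) := by
  unfold Pre_reduced_counter; infer_instance

def pvWitness_reduced_counter : List Int := [3, 0, 1, 2, 2, -5]

def Spec_reduced_counter (counter : List Int) (out : List Int) : Prop := out = reduced_counter_alt counter
instance (counter : List Int) (out : List Int) : Decidable (Spec_reduced_counter counter out) := by unfold Spec_reduced_counter; infer_instance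

-- ===== CLAIM (what is proved, stated in full; the proofs are below) =====
def Claim_equal_reduced_counter : Prop := ∀ (counter : List Int), Dom_reduced_counter counter → Pre_reduced_counter counter → Spec_reduced_counter counter (reduced_counter counter)

-- ===== LEMMAS AND PROOFS =====

-- Insert into a descending list: n goes before the first element < n
-- (after any elements equal to n — matching A's stop condition).
def insDesc (n : Int) : List Int → List Int
  | [] => [n]
  | x :: xs => if x < n then n :: x :: xs else x :: insDesc n xs

theorem insDesc_perm (n : Int) (t : List Int) : (insDesc n t).Perm (n :: t) := by
  induction t with
  | nil => simp [insDesc]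
  | cons x xs ih =>
    simp only [insDesc]
    split
    · exact List.Perm.refl _
    · exact (List.Perm.cons x ih).trans (List.Perm.swap _ _ _)

theorem insDesc_sorted (n : Int) (t : List Int) (h : t.Pairwise (· ≥ ·)) :
    (insDesc n t).Pairwise (· ≥ ·) := by
  induction t with
  | nil => simp [insDesc]
  | cons x xs ih =>
    simp only [insDesc]
    rcases List.pairwise_cons.mp h with ⟨hx, hxs⟩
    split
    · rename_i hlt
      refine List.pairwise_cons.mpr ⟨?_, h⟩
      intro b hb
      rcases List.mem_cons.mp hb with rfl | hb
      · omega
      · have := hx b hb; omega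
    · rename_i hge
      refine List.pairwise_cons.mpr ⟨?_, ih hxs⟩
      intro b hb
      rcases List.mem_cons.mp ((insDesc_perm n xs).mem_iff.mp hb) with rfl | hb
      · omega
      · exact hx b hb

theorem insDesc_append_lt (n a : Int) (t : List Int) (h : a < n) :
    insDesc n (t ++ [a]) = insDesc n t ++ [a] := by
  induction t with
  | nil => simp [insDesc, h]
  | cons x xs ih =>
    simp only [List.cons_append, insDesc]
    split
    · rfl
    · rw [ih]; rfl

theorem insDesc_append_end (n : Int) (t : List Int) (h : ∀ x ∈ t, ¬ x < n) :
    insDesc n t = t ++ [n] := by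
  induction t with
  | nil => simp [insDesc]
  | cons x xs ih =>
    simp only [insDesc]
    rw [if_neg (h x (by simp)), ih (fun y hy => h y (by simp [hy]))]; rfl

-- A's while loop realises insDesc on a sorted prefix followed by padding.
theorem aInsert_eq (n : Int) (t pad : List Int) (h : t.Pairwise (· ≥ ·)) :
    aInsert (t ++ 0 :: pad) n t.length = insDesc n t ++ pad := by
  induction t using List.reverseRecOn generalizing pad with
  | nil => simp [aInsert, insDesc]
  | append_singleton t' a ih =>
    have hlen : (t' ++ [a]).length = t'.length + 1 := by simp
    rw [hlen]
    have hsort : t'.Pairwise (· ≥ ·) := (List.pairwise_append.mp h).1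
    have hge : ∀ x ∈ t', a ≤ x := by
      intro x hx
      exact (List.pairwise_append.mp h).2.2 x hx a (by simp)
    have hga : ((t' ++ [a]) ++ 0 :: pad).getD t'.length 0 = a := by
      simp [List.getD]
    have hgb : ((t' ++ [a]) ++ 0 :: pad).getD (t'.length + 1) 0 = 0 := by
      simp [List.getD]
    simp only [aInsert, hga, hgb]
    split
    · rename_i hlt
      have hset : (((t' ++ [a]) ++ 0 :: pad).set (t'.length + 1) a).set t'.length 0
          = t' ++ 0 :: (a :: pad) := by
        have e1 : (t' ++ [a]) ++ 0 :: pad = t' ++ (a :: 0 :: pad) := by simp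
        rw [e1, List.set_append_right _ _ (by omega), List.set_append_right _ _ (by omega)]
        simp
      rw [hset, ih _ hsort, insDesc_append_lt n a t' hlt]
      simp
    · rename_i hnlt
      rw [List.set_append_right _ _ (by simp),
        insDesc_append_end n (t' ++ [a])
        (by intro x hx
            rcases List.mem_append.mp hx with hx | hx
            · have := hge x hx; omega
            · simp at hx; omega)]
      simp

-- The fold invariant: state = (sorted prefix ++ zero padding, prefix length).
theorem fold_invariant (cs : List Int) (t : List Int)
    (hs : t.Pairwise (· ≥ ·))
    (hb : t.length + (cs.filter (fun n => n ≠ 0)).length ≤ 26) :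
    (cs.foldl (fun (st : List Int × Nat) n =>
        if n = 0 then st else (aInsert st.1 n st.2, st.2 + 1))
      (t ++ List.replicate (26 - t.length) 0, t.length)).1
    = cs.foldl (fun acc n => if n = 0 then acc else insDesc n acc) t
      ++ List.replicate (26 - (cs.foldl (fun acc n => if n = 0 then acc else insDesc n acc) t).length) 0 := by
  induction cs generalizing t with
  | nil => simp
  | cons c cs ih =>
    simp only [List.foldl_cons]
    by_cases hc : c = 0
    · simp only [if_pos hc]
      exact ih t hs (by simpa [List.filter_cons, hc, ne_eq] using hb)
    · simp only [if_neg hc]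
      have hfc : (c :: cs).filter (fun n => n ≠ 0) = c :: cs.filter (fun n => n ≠ 0) := by
        simp [hc]
      rw [hfc, List.length_cons] at hb
      have hlt : t.length < 26 := by omega
      have hrep : List.replicate (26 - t.length) (0 : Int)
          = 0 :: List.replicate (26 - t.length - 1) 0 := by
        rw [← List.replicate_succ]
        congr 1
        omega
      have hins := aInsert_eq c t (List.replicate (26 - t.length - 1) 0) hs
      have hlen : (insDesc c t).length = t.length + 1 := by
        simpa using (insDesc_perm c t).length_eq
      have := ih (insDesc c t) (insDesc_sorted c t hs)
        (by omega)
      rw [hrep, hins]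
      have hrep2 : List.replicate (26 - t.length - 1) (0 : Int)
          = List.replicate (26 - (insDesc c t).length) 0 := by rw [hlen]; congr 1
      rw [hrep2, hlen] at *
      exact this

theorem fold_perm (cs : List Int) (t : List Int) :
    (cs.foldl (fun acc n => if n = 0 then acc else insDesc n acc) t).Perm
      ((cs.filter (fun n => n ≠ 0)).reverse ++ t) := by
  induction cs generalizing t with
  | nil => simp
  | cons c cs ih =>
    simp only [List.foldl_cons]
    by_cases hc : c = 0
    · simpa [hc] using ih t
    · rw [if_neg hc]
      refine (ih (insDesc c t)).trans ?_
      have h1 : (insDesc c t).Perm (c :: t) := insDesc_perm c t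
      have e : List.filter (fun n => decide (n ≠ 0)) (c :: cs)
          = c :: List.filter (fun n => decide (n ≠ 0)) cs := by
        simp [hc]
      simp only [e, List.reverse_cons, List.append_assoc, List.singleton_append]
      exact List.Perm.append_left _ h1

theorem fold_sorted (cs : List Int) (t : List Int) (hs : t.Pairwise (· ≥ ·)) :
    (cs.foldl (fun acc n => if n = 0 then acc else insDesc n acc) t).Pairwise (· ≥ ·) := by
  induction cs generalizing t with
  | nil => simpa
  | cons c cs ih =>
    simp only [List.foldl_cons]
    by_cases hc : c = 0
    · simp only [if_pos hc]; exact ih t hs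
    · simp only [if_neg hc]; exact ih _ (insDesc_sorted c t hs)

theorem fold_eq_sorted (cs : List Int) :
    cs.foldl (fun acc n => if n = 0 then acc else insDesc n acc) ([] : List Int)
    = PySem.List.sorted (cs.filter (fun n => n ≠ 0)) (fun x => x) true := by
  have hp1 : (cs.foldl (fun acc n => if n = 0 then acc else insDesc n acc) ([] : List Int)).Perm
      (cs.filter (fun n => n ≠ 0)) := by
    refine (fold_perm cs []).trans ?_
    simp
  have hp2 : (PySem.List.sorted (cs.filter (fun n => n ≠ 0)) (fun x => x) true).Perm
      (cs.filter (fun n => n ≠ 0)) :=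
    PySem.List.sorted_perm _ _ _
  have hs1 := fold_sorted cs [] (by simp)
  have hs2 := PySem.List.sorted_pairwise_rev (cs.filter (fun n => n ≠ 0)) (fun x => x)
  exact List.Perm.eq_of_pairwise
    (fun a b _ _ h1 h2 => le_antisymm h2 h1) hs1 hs2 (hp1.trans hp2.symm)

-- ===== VERDICT (by name: the statement is the Claim_ definition above) =====
theorem reduced_counter_spec : Claim_equal_reduced_counter := by
  intro counter _ hpre
  unfold Spec_reduced_counter reduced_counter reduced_counter_alt
  have h0 := fold_invariant counter [] (by simp) (by unfold Pre_reduced_counter at hpre; simpa using hpre)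
  simp only [List.length_nil, Nat.sub_zero, List.nil_append] at h0
  rw [h0, fold_eq_sorted]
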